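-- pv_equiv track=rewrite | github.com/SquishyC4/Scrap-Mechanic-CPU-Mario | Preprocessor.py | create_contex_tables
-- ===== SOURCE A (Python) =====
-- def create_contex_tables(tokens) -> (list, dict, dict):
--     code = []
--     defines = {}
--     labels = {}
--     line_count = 0
--     i = 0
--     while i < len(tokens):
--         line = tokens[i]
--         element = line[0]
--         if element[0] != '#' and element[0] != '.' and element[-1] != ':':
--             code.append(line)
--             line_count += 1
--         elif element[0] == '#':
--             if element[1] == 'd':     #define
--                 i += 1
--                 while i < len(tokens) and tokens[i][0][-1] != ':':
--                     defines.update({tokens[i][0]:tokens[i][1]})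
--                     i += 1
--                 continue
--         elif element[0] == '.':
--             labels.update({element[0:]:line_count})
--         elif element[-1] == ':':
--             labels.update({element[:-1]:line_count})
--         i += 1
--     return code, defines, labels
-- ===== SOURCE B (Python) =====
-- def create_contex_tables(tokens) -> (list, dict, dict):
--     code = []
--     defines = {}
--     labels = {}
--     line_count = 0
--     in_define = False
--     for line in tokens:
--         element = line[0]
--         if in_define:
--             if element[-1] != ':':
--                 defines[element] = line[1]
--                 continue
--             in_define = False
--         if element[0] != '#' and element[0] != '.' and element[-1] != ':':
--             code.append(line)
--             line_count += 1
--         elif element[0] == '#':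
--             if element[1] == 'd':
--                 in_define = True
--         elif element[0] == '.':
--             labels[element] = line_count
--         else:
--             labels[element[:-1]] = line_count
--     return code, defines, labels
-- ===== Notes on version B (the rewrite author's own statement) =====
-- stated objective: simpler
-- what changed: Replaced A's index-based outer while loop with a nested inner while for define blocks by a single for-loop over the lines carrying an explicit in_define boolean flag; the block terminator falls through to normal processing in the same iteration.
import Mathlib
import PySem

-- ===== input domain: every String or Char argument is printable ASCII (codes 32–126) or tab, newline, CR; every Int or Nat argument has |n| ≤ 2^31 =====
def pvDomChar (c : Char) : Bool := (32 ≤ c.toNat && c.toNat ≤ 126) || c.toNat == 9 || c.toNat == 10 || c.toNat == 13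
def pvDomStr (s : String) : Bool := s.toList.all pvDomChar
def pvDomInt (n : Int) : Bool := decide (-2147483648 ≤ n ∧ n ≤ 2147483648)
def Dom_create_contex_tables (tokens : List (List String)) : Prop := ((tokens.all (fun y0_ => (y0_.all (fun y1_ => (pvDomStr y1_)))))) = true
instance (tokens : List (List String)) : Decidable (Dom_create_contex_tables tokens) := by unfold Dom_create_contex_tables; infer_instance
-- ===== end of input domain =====

-- B replaces A's index-based outer/inner while loops by a single pass over the lines with an
-- explicit in-define boolean flag (objective: simpler decomposition, same cost).

-- ===== PORT A =====
-- inner while of A: swallow lines into `defines` until one whose first token ends in ':'.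
-- line[0] / line[1] / element[-1] are ported with defaults (headD/getD/getLastD); Pre_ excludes
-- exactly the inputs where the Python would raise IndexError at those points.
def cctInner (tokens : List (List String)) (i : Nat) (defines : PySem.Dict String String) :
    Nat × PySem.Dict String String :=
  if _h : i < tokens.length then
    let line := tokens[i]
    if (line.headD "").toList.getLastD ' ' ≠ ':' then
      cctInner tokens (i + 1) (defines.insert (line.headD "") (line.getD 1 ""))
    else (i, defines)
  else (i, defines)
termination_by tokens.length - i
decreasing_by exact Nat.sub_succ_lt_self tokens.length i _h

theorem cctInner_fst_ge (tokens : List (List String)) (i : Nat) (d : PySem.Dict String String) :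
    i ≤ (cctInner tokens i d).1 := by
  fun_induction cctInner tokens i d with
  | case1 i d h line hlast ih => omega
  | case2 => simp
  | case3 => simp

def cctLoopA (tokens : List (List String)) (i : Nat) (code : List (List String))
    (defines : PySem.Dict String String) (labels : PySem.Dict String Int) (lc : Int) :
    List (List String) × (List (String × String)) × (List (String × Int)) :=
  if _h : i < tokens.length then
    let line := tokens[i]
    let e := (line.headD "").toList
    if e.headD ' ' ≠ '#' ∧ e.headD ' ' ≠ '.' ∧ e.getLastD ' ' ≠ ':' then
      cctLoopA tokens (i + 1) (code ++ [line]) defines labels (lc + 1)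
    else if e.headD ' ' = '#' then
      if e.getD 1 ' ' = 'd' then
        let p := cctInner tokens (i + 1) defines
        cctLoopA tokens p.1 code p.2 labels lc
      else cctLoopA tokens (i + 1) code defines labels lc
    else if e.headD ' ' = '.' then
      cctLoopA tokens (i + 1) code defines (labels.insert (line.headD "") lc) lc
    else
      cctLoopA tokens (i + 1) code defines (labels.insert (String.ofList e.dropLast) lc) lc
  else (code, defines.items, labels.items)
termination_by tokens.length - i
decreasing_by
  · exact Nat.sub_succ_lt_self tokens.length i _h
  · exact Nat.sub_lt_sub_left _h
      (Nat.lt_of_lt_of_le (Nat.lt_succ_self i) (cctInner_fst_ge tokens (i + 1) defines))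
  · exact Nat.sub_succ_lt_self tokens.length i _h
  · exact Nat.sub_succ_lt_self tokens.length i _h
  · exact Nat.sub_succ_lt_self tokens.length i _h

def create_contex_tables (tokens : List (List String)) :
    List (List String) × (List (String × String)) × (List (String × Int)) :=
  cctLoopA tokens 0 [] PySem.Dict.empty PySem.Dict.empty 0

-- ===== PORT B =====
def cctLoopB (lines : List (List String)) (inDef : Bool) (code : List (List String))
    (defines : PySem.Dict String String) (labels : PySem.Dict String Int) (lc : Int) :
    List (List String) × (List (String × String)) × (List (String × Int)) :=
  match lines with
  | [] => (code, defines.items, labels.items)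
  | line :: rest =>
    let e := (line.headD "").toList
    if inDef = true ∧ e.getLastD ' ' ≠ ':' then
      cctLoopB rest true code (defines.insert (line.headD "") (line.getD 1 "")) labels lc
    else if e.headD ' ' ≠ '#' ∧ e.headD ' ' ≠ '.' ∧ e.getLastD ' ' ≠ ':' then
      cctLoopB rest false (code ++ [line]) defines labels (lc + 1)
    else if e.headD ' ' = '#' then
      cctLoopB rest (decide (e.getD 1 ' ' = 'd')) code defines labels lc
    else if e.headD ' ' = '.' then
      cctLoopB rest false code defines (labels.insert (line.headD "") lc) lc
    else
      cctLoopB rest false code defines (labels.insert (String.ofList e.dropLast) lc) lc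

def create_contex_tables_alt (tokens : List (List String)) :
    List (List String) × (List (String × String)) × (List (String × Int)) :=
  cctLoopB tokens false [] PySem.Dict.empty PySem.Dict.empty 0

-- ===== PRECONDITION & SPEC =====
-- first token of line j (empty list when the line or its first token is missing/empty)
def cctTok (tokens : List (List String)) (j : Nat) : List Char :=
  ((tokens.getD j []).headD "").toList

-- first token of line j starts with "#d" (the define directive)
def cctStartsDef (tokens : List (List String)) (j : Nat) : Bool :=
  (cctTok tokens j).headD ' ' == '#' && (cctTok tokens j).getD 1 ' ' == 'd'

-- first token of line j ends with ':'
def cctEndsColon (tokens : List (List String)) (j : Nat) : Bool :=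
  (cctTok tokens j).getLastD ' ' == ':'

-- line j is swallowed by a define block: its token does not end in ':' and some earlier line
-- starts with "#d" with no ':'-terminated token strictly in between
def cctSwallowed (tokens : List (List String)) (j : Nat) : Bool :=
  !cctEndsColon tokens j &&
    decide (∃ k < j, cctStartsDef tokens k = true ∧
      ∀ m < j, k < m → cctEndsColon tokens m = false)

-- Pre_ holds exactly where the Python A returns without an IndexError: every line is nonempty with
-- a nonempty first token, a line swallowed by a define block has a second element, and otherwise a
-- first token starting with '#' has a second character.
def Pre_create_contex_tables (tokens : List (List String)) : Prop :=
  ∀ j < tokens.length,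
    cctTok tokens j ≠ [] ∧
    (cctSwallowed tokens j = true → 2 ≤ (tokens.getD j []).length) ∧
    (cctSwallowed tokens j = false →
      (cctTok tokens j).headD ' ' = '#' → 2 ≤ (cctTok tokens j).length)
instance (tokens : List (List String)) : Decidable (Pre_create_contex_tables tokens) := by
  unfold Pre_create_contex_tables; infer_instance

def pvWitness_create_contex_tables : List (List String) :=
  [["mov", "a"], ["#define"], ["X", "1"], ["loop:"], ["jmp", "loop"], [".end"]]

def Spec_create_contex_tables (tokens : List (List String)) (out : List (List String) × (List (String × String)) × (List (String × Int))) : Prop := out = create_contex_tables_alt tokens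
instance (tokens : List (List String)) (out : List (List String) × (List (String × String)) × (List (String × Int))) : Decidable (Spec_create_contex_tables tokens out) := by unfold Spec_create_contex_tables; infer_instance

-- ===== CLAIM (what is proved, stated in full; the proofs are below) =====
def Claim_equal_create_contex_tables : Prop := ∀ (tokens : List (List String)), Dom_create_contex_tables tokens → Pre_create_contex_tables tokens → Spec_create_contex_tables tokens (create_contex_tables tokens)

-- ===== LEMMAS AND PROOFS =====

-- step equation of B's loop on a cons (plain rfl; used so rewriting keeps the source syntax)
theorem cctLoopB_cons (line : List String) (rest : List (List String)) (b : Bool)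
    (code : List (List String)) (defines : PySem.Dict String String)
    (labels : PySem.Dict String Int) (lc : Int) :
    cctLoopB (line :: rest) b code defines labels lc =
      (if b = true ∧ (line.headD "").toList.getLastD ' ' ≠ ':' then
        cctLoopB rest true code (defines.insert (line.headD "") (line.getD 1 "")) labels lc
      else if (line.headD "").toList.headD ' ' ≠ '#' ∧ (line.headD "").toList.headD ' ' ≠ '.' ∧
          (line.headD "").toList.getLastD ' ' ≠ ':' then
        cctLoopB rest false (code ++ [line]) defines labels (lc + 1)
      else if (line.headD "").toList.headD ' ' = '#' then
        cctLoopB rest (decide ((line.headD "").toList.getD 1 ' ' = 'd')) code defines labels lc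
      else if (line.headD "").toList.headD ' ' = '.' then
        cctLoopB rest false code defines (labels.insert (line.headD "") lc) lc
      else
        cctLoopB rest false code defines
          (labels.insert (String.ofList (line.headD "").toList.dropLast) lc) lc) := rfl

-- When the current first token ends in ':', B's define branch is skipped and the flag is dropped,
-- so the in-define flag does not matter on such a line.
theorem cctLoopB_colon (line : List String) (rest : List (List String)) (b : Bool)
    (code : List (List String)) (defines : PySem.Dict String String)
    (labels : PySem.Dict String Int) (lc : Int)
    (hlast : (line.headD "").toList.getLastD ' ' = ':') :
    cctLoopB (line :: rest) b code defines labels lc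
      = cctLoopB (line :: rest) false code defines labels lc := by
  cases b with
  | false => rfl
  | true =>
    rw [cctLoopB_cons, cctLoopB_cons,
      if_neg (show ¬(true = true ∧ (line.headD "").toList.getLastD ' ' ≠ ':') from
        fun h => h.2 hlast),
      if_neg (show ¬(false = true ∧ (line.headD "").toList.getLastD ' ' ≠ ':') from
        fun h => Bool.false_ne_true h.1)]

-- Main simulation: A's outer loop from index i equals B's pass over the remaining lines with the
-- flag false, and A's inner define loop followed by the outer loop equals B's pass with the flag true.
theorem cct_main (tokens : List (List String)) (n : Nat) :
    (∀ i, tokens.length ≤ i + n →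
      ∀ code defines labels lc,
        cctLoopA tokens i code defines labels lc
          = cctLoopB (tokens.drop i) false code defines labels lc) ∧
    (∀ i, tokens.length ≤ i + n →
      ∀ code defines labels lc,
        cctLoopA tokens (cctInner tokens i defines).1 code (cctInner tokens i defines).2 labels lc
          = cctLoopB (tokens.drop i) true code defines labels lc) := by
  induction n with
  | zero =>
    constructor
    · intro i hi code defines labels lc
      rw [cctLoopA, List.drop_of_length_le (by omega),
        dif_neg (by omega : ¬ i < tokens.length)]
      rfl
    · intro i hi code defines labels lc
      rw [cctInner, dif_neg (by omega : ¬ i < tokens.length)]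
      show cctLoopA tokens i code defines labels lc = _
      rw [cctLoopA, List.drop_of_length_le (by omega),
        dif_neg (by omega : ¬ i < tokens.length)]
      rfl
  | succ n ih =>
    obtain ⟨ih1, ih2⟩ := ih
    have h1 : ∀ i, tokens.length ≤ i + (n + 1) →
        ∀ code defines labels lc,
          cctLoopA tokens i code defines labels lc
            = cctLoopB (tokens.drop i) false code defines labels lc := by
      intro i hi code defines labels lc
      by_cases hlt : i < tokens.length
      · rw [List.drop_eq_getElem_cons hlt, cctLoopA]
        simp only [dif_pos hlt]
        rw [cctLoopB_cons,
          if_neg (show ¬(false = true ∧ (tokens[i].headD "").toList.getLastD ' ' ≠ ':') from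
            fun h => Bool.false_ne_true h.1)]
        set line := tokens[i] with hline
        set e := (line.headD "").toList with he
        by_cases hc : e.headD ' ' ≠ '#' ∧ e.headD ' ' ≠ '.' ∧ e.getLastD ' ' ≠ ':'
        · rw [if_pos hc, if_pos hc, ih1 (i + 1) (by omega)]
        · rw [if_neg hc, if_neg hc]
          by_cases hh : e.headD ' ' = '#'
          · rw [if_pos hh, if_pos hh]
            by_cases hd : e.getD 1 ' ' = 'd'
            · rw [if_pos hd]
              simp only [hd, decide_true]
              exact ih2 (i + 1) (by omega) code defines labels lc
            · rw [if_neg hd, decide_eq_false hd]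
              exact ih1 (i + 1) (by omega) code defines labels lc
          · rw [if_neg hh, if_neg hh]
            by_cases hp : e.headD ' ' = '.'
            · rw [if_pos hp, if_pos hp, ih1 (i + 1) (by omega)]
            · rw [if_neg hp, if_neg hp, ih1 (i + 1) (by omega)]
      · rw [cctLoopA, List.drop_of_length_le (by omega), dif_neg hlt]
        rfl
    refine ⟨h1, ?_⟩
    intro i hi code defines labels lc
    by_cases hlt : i < tokens.length
    · rw [cctInner]
      simp only [dif_pos hlt]
      set line := tokens[i] with hline
      by_cases hlast : (line.headD "").toList.getLastD ' ' = ':'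
      · rw [if_neg (fun h => h hlast)]
        rw [List.drop_eq_getElem_cons hlt, cctLoopB_colon _ _ _ _ _ _ _ hlast,
          ← List.drop_eq_getElem_cons hlt]
        exact h1 i (by omega) code defines labels lc
      · rw [if_pos hlast]
        rw [List.drop_eq_getElem_cons hlt, cctLoopB_cons, if_pos ⟨rfl, hlast⟩]
        exact ih2 (i + 1) (by omega) code (defines.insert (line.headD "") (line.getD 1 "")) labels lc
    · rw [cctInner, dif_neg (by omega : ¬ i < tokens.length)]
      show cctLoopA tokens i code defines labels lc = _
      rw [cctLoopA, List.drop_of_length_le (by omega),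
        dif_neg (by omega : ¬ i < tokens.length)]
      rfl

-- ===== VERDICT (by name: the statement is the Claim_ definition above) =====
theorem create_contex_tables_spec : Claim_equal_create_contex_tables := by
  intro tokens _ _
  unfold Spec_create_contex_tables create_contex_tables create_contex_tables_alt
  have := (cct_main tokens tokens.length).1 0 (by omega) [] PySem.Dict.empty PySem.Dict.empty 0
  simpa using this
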